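-- pv_equiv track=rewrite | github.com/cjlim05/coding-test | 프로그래머스/2/388352. 비밀 코드 해독/비밀 코드 해독.py | solution
-- ===== SOURCE A (Python) =====
-- from itertools import combinations
--
-- def solution(n, q, ans):
--     count = 0
--
--     # n개의 수 중 5개를 고른 모든 조합을 확인
--     for comb in combinations(range(1, n+1), 5):
--         is_valid = True
--
--         # 각 시도와 시스템 응답이 일치하는지 확인
--         for i in range(len(q)):
--             # 현재 조합과 시도한 수의 교집합의 개수를 센다
--             match_count = len(set(comb) & set(q[i]))
--             if match_count != ans[i]:
--                 is_valid = False
--                 break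
--
--         if is_valid:
--             count += 1
--
--     return count
-- ===== SOURCE B (Python) =====
-- def solution(n, q, ans):
--     # Pick/skip DFS over 1..n with incremental per-query overlap counters,
--     # memoized on (suffix length, need, counters): equal subproblems collapse,
--     # so this is a DP rather than an enumeration of all C(n,5) candidates.
--     target = tuple(ans[:len(q)])
--     memo = {}
--
--     def go(avail, need, counts):
--         if need == 0:
--             return 1 if counts == target else 0
--         if not avail:
--             return 0
--         key = (len(avail), need, counts)
--         if key in memo:
--             return memo[key]
--         x, rest = avail[0], avail[1:]
--         bumped = tuple(c + (1 if x in g else 0) for c, g in zip(counts, q))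
--         res = go(rest, need - 1, bumped) + go(rest, need, counts)
--         memo[key] = res
--         return res
--
--     return go(tuple(range(1, n + 1)), 5, tuple(0 for _ in q))
-- ===== Notes on version B (the rewrite author's own statement) =====
-- stated objective: alternative
-- what changed: Replaces materializing all C(n,5) itertools combinations and re-computing a set intersection per (combo, query) with a pick/skip DFS over 1..n that carries incremental per-query overlap counters and memoizes on (suffix length, picks left, counter vector), collapsing equal subproblems into a DP.
-- outside the precondition, e.g. on solution(5, [[1], [2]], [0]): A returns 0, B returns 0; on solution(5, [[9]], []): A raises IndexError, B returns 0
import Mathlib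
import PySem

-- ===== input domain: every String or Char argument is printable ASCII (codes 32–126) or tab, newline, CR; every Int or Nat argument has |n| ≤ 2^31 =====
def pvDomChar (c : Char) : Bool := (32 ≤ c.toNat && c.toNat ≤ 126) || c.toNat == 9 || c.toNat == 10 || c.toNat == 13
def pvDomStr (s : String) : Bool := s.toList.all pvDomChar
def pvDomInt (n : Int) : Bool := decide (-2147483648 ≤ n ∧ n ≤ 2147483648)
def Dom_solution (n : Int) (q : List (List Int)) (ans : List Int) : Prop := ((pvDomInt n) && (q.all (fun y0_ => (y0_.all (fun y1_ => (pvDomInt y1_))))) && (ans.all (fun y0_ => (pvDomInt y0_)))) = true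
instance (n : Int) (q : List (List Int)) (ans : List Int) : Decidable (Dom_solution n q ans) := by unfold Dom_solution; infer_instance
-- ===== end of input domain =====

-- B replaces generate-all-combinations + per-query set intersections by a memoized
-- pick/skip DFS (a DP) with incremental per-query overlap counters.

-- ===== PORT A =====
-- itertools.combinations(l, k) in lexicographic order
def pvCombA : List Int → Nat → List (List Int)
  | _, 0 => [[]]
  | [], _ + 1 => []
  | x :: xs, k + 1 => (pvCombA xs k).map (fun c => x :: c) ++ pvCombA xs (k + 1)

-- the inner 'for i in range(len(q))' loop with its break; running out of ans is
-- Python's IndexError (excluded by Pre_solution)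
def pvCheckA (comb : List Int) : List (List Int) → List Int → Bool
  | [], _ => true
  | _ :: _, [] => false
  | g :: gs, a :: as' =>
    if (PySem.Set.len (PySem.Set.inter (PySem.Set.ofList comb) (PySem.Set.ofList g)) : Int) = a
    then pvCheckA comb gs as' else false

def solution (n : Int) (q : List (List Int)) (ans : List Int) : Int :=
  (pvCombA (PySem.List.pyRange 1 (n + 1) 1) 5).foldl
    (fun count comb => if pvCheckA comb q ans then count + 1 else count) 0

-- ===== PORT B =====
-- tuple(c + (1 if x in g else 0) for c, g in zip(counts, q))
def pvBump (counts : List Int) (q : List (List Int)) (x : Int) : List Int :=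
  (counts.zip q).map (fun p => p.1 + (if p.2.contains x then 1 else 0))

-- go(avail, need, counts) with the memo dict threaded through explicitly;
-- key = (len(avail), need, counts)
def pvGoBM (q : List (List Int)) (target : List Int) :
    List Int → Nat → List Int → PySem.Dict (Int × Int × List Int) Int →
    Int × PySem.Dict (Int × Int × List Int) Int
  | _, 0, counts, memo => ((if counts = target then 1 else 0), memo)
  | [], _ + 1, _, memo => (0, memo)
  | x :: rest, need + 1, counts, memo =>
    let key : Int × Int × List Int := (((x :: rest).length : Int), ((need : Int) + 1), counts)
    match memo.get? key with
    | some v => (v, memo)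
    | none =>
      let r1 := pvGoBM q target rest need (pvBump counts q x) memo
      let r2 := pvGoBM q target rest (need + 1) counts r1.2
      (r1.1 + r2.1, (r2.2).insert key (r1.1 + r2.1))
  termination_by avail _ _ _ => avail.length

def solution_alt (n : Int) (q : List (List Int)) (ans : List Int) : Int :=
  -- ans[:len(q)] with a nonnegative bound is List.take; the initial memo is empty
  (pvGoBM q (ans.take q.length) (PySem.List.pyRange 1 (n + 1) 1) 5
    (List.replicate q.length 0) PySem.Dict.empty).1

-- ===== PRECONDITION & SPEC =====
-- Pre_ excludes inputs with fewer answers than queries (unless n < 5, where no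
-- combination exists and A cannot raise): on those A raises IndexError whenever some
-- combination matches every provided answer, and returns only accidentally otherwise
-- (a mismatch occurring before the missing index).
def Pre_solution (n : Int) (q : List (List Int)) (ans : List Int) : Prop :=
  q.length ≤ ans.length ∨ n < 5
instance (n : Int) (q : List (List Int)) (ans : List Int) : Decidable (Pre_solution n q ans) := by
  unfold Pre_solution; infer_instance

def pvWitness_solution : Int × List (List Int) × List Int := (6, [[1, 2, 3]], [2])

def Spec_solution (n : Int) (q : List (List Int)) (ans : List Int) (out : Int) : Prop := out = solution_alt n q ans
instance (n : Int) (q : List (List Int)) (ans : List Int) (out : Int) : Decidable (Spec_solution n q ans out) := by unfold Spec_solution; infer_instance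

-- ===== CLAIM (what is proved, stated in full; the proofs are below) =====
def Claim_equal_solution : Prop := ∀ (n : Int) (q : List (List Int)) (ans : List Int), Dom_solution n q ans → Pre_solution n q ans → Spec_solution n q ans (solution n q ans)

-- ===== LEMMAS AND PROOFS =====

-- the memo-free pick/skip recursion (proof-layer model of pvGoBM)
def pvGoB (q : List (List Int)) (target : List Int) : List Int → Nat → List Int → Int
  | _, 0, counts => if counts = target then 1 else 0
  | [], _ + 1, _ => 0
  | x :: rest, need + 1, counts =>
    pvGoB q target rest need (pvBump counts q x) + pvGoB q target rest (need + 1) counts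
  termination_by avail _ _ => avail.length

-- a memo is good when every entry records the memo-free value for the unique
-- suffix of nums with the recorded length
def pvGood (q : List (List Int)) (target nums : List Int)
    (memo : PySem.Dict (Int × Int × List Int) Int) : Prop :=
  ∀ (L nd : Int) (cs : List Int) (v : Int),
    memo.get? (L, nd, cs) = some v →
    ∃ (su : List Int) (k : Nat), su <:+ nums ∧ (su.length : Int) = L ∧ ((k : Int) = nd) ∧
      v = pvGoB q target su k cs

theorem pvSuffix_eq_of_length {su av nums : List Int} (h1 : su <:+ nums) (h2 : av <:+ nums)
    (hl : su.length = av.length) : su = av := by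
  obtain ⟨t1, rfl⟩ := h1
  obtain ⟨t2, ht2⟩ := h2
  have hlen : t2.length = t1.length := by
    have := congrArg List.length ht2
    simp at this
    omega
  exact (List.append_inj_right ht2 hlen).symm

-- the memoized DFS computes the memo-free value and preserves goodness
theorem pvGoBM_eq (q : List (List Int)) (t nums : List Int) :
    ∀ (avail : List Int) (need : Nat) (counts : List Int)
      (memo : PySem.Dict (Int × Int × List Int) Int),
      avail <:+ nums → pvGood q t nums memo →
      (pvGoBM q t avail need counts memo).1 = pvGoB q t avail need counts ∧
      pvGood q t nums (pvGoBM q t avail need counts memo).2 := by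
  intro avail
  induction avail with
  | nil =>
    intro need counts memo _ hgood
    cases need with
    | zero => exact ⟨by simp [pvGoBM, pvGoB], by simpa [pvGoBM] using hgood⟩
    | succ k => exact ⟨by simp [pvGoBM, pvGoB], by simpa [pvGoBM] using hgood⟩
  | cons x rest ih =>
    intro need counts memo hsuf hgood
    have hrest : rest <:+ nums := (List.suffix_cons x rest).trans hsuf
    cases need with
    | zero => exact ⟨by simp [pvGoBM, pvGoB], by simpa [pvGoBM] using hgood⟩
    | succ k =>
      simp only [pvGoBM]
      cases hkey : memo.get? (((rest.length : Int) + 1), ((k : Int) + 1), counts) with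
      | some v =>
        simp only [List.length_cons, Int.natCast_add, Int.natCast_one, hkey]
        obtain ⟨su, kk, hs, hL, hk, hv⟩ := hgood _ _ _ _ hkey
        have hsu : su = x :: rest := by
          apply pvSuffix_eq_of_length hs hsuf
          simp only [List.length_cons]
          omega
        have hkk : kk = k + 1 := by omega
        subst hsu hkk
        exact ⟨hv, hgood⟩
      | none =>
        simp only [List.length_cons, Int.natCast_add, Int.natCast_one, hkey]
        obtain ⟨h1, g1⟩ := ih k (pvBump counts q x) memo hrest hgood
        obtain ⟨h2, g2⟩ := ih (k + 1) counts _ hrest g1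
        constructor
        · rw [h1, h2]
          simp [pvGoB]
        · intro L nd cs v hv
          rw [PySem.Dict.get?_insert] at hv
          by_cases heq : (L, nd, cs) = (((rest.length : Int) + 1), ((k : Int) + 1), counts)
          · rw [if_pos heq] at hv
            injection hv with hv
            obtain ⟨hL, hnd, hcs⟩ : L = ((rest.length : Int) + 1) ∧ nd = ((k : Int) + 1) ∧ cs = counts := by
              simpa [Prod.ext_iff] using heq
            subst hL hnd hcs
            refine ⟨x :: rest, k + 1, hsuf, by simp, by push_cast; ring, ?_⟩
            rw [← hv, h1, h2]
            simp [pvGoB]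
          · rw [if_neg heq] at hv
            exact g2 _ _ _ _ hv

-- B's entry point equals the memo-free recursion
theorem solution_alt_eq (n : Int) (q : List (List Int)) (ans : List Int) :
    solution_alt n q ans =
      pvGoB q (ans.take q.length) (PySem.List.pyRange 1 (n + 1) 1) 5
        (List.replicate q.length 0) := by
  have h := pvGoBM_eq q (ans.take q.length) (PySem.List.pyRange 1 (n + 1) 1)
    (PySem.List.pyRange 1 (n + 1) 1) 5 (List.replicate q.length 0) PySem.Dict.empty
    (List.suffix_rfl)
    (by intro L nd cs v hv; simp [PySem.Dict.get?_empty] at hv)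
  unfold solution_alt
  exact h.1

-- bumping all elements of a combination in turn
def pvBumpAll (q : List (List Int)) (counts : List Int) (comb : List Int) : List Int :=
  comb.foldl (fun cs x => pvBump cs q x) counts

theorem pvBumpAll_nil_counts (q : List (List Int)) (comb : List Int) :
    pvBumpAll q [] comb = [] := by
  induction comb with
  | nil => rfl
  | cons x rest ih => simpa [pvBumpAll, pvBump] using ih

theorem pvBumpAll_cons (g : List Int) (gs : List (List Int)) (c0 : Int) (cs : List Int)
    (comb : List Int) :
    pvBumpAll (g :: gs) (c0 :: cs) comb =
      (c0 + (comb.countP (fun x => g.contains x) : Int)) :: pvBumpAll gs cs comb := by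
  induction comb generalizing c0 cs with
  | nil => simp [pvBumpAll]
  | cons x rest ih =>
    simp only [pvBumpAll, List.foldl_cons] at *
    rw [show pvBump (c0 :: cs) (g :: gs) x
        = (c0 + (if g.contains x then 1 else 0)) :: pvBump cs gs x from rfl]
    rw [ih]
    congr 1
    rw [List.countP_cons]
    by_cases h : g.contains x = true <;> simp [h] <;> omega

theorem pvBumpAll_replicate (q : List (List Int)) (comb : List Int) :
    pvBumpAll q (List.replicate q.length 0) comb =
      q.map (fun g => (comb.countP (fun x => g.contains x) : Int)) := by
  induction q with
  | nil => simpa using pvBumpAll_nil_counts [] comb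
  | cons g gs ih =>
    simp only [List.length_cons, List.replicate_succ, List.map_cons]
    rw [pvBumpAll_cons, ih]
    simp

-- the memo-free DFS counts the combinations whose bumped counter vector hits the target
theorem pvGoB_eq_countP (q : List (List Int)) (t : List Int) :
    ∀ (need : Nat) (avail counts : List Int),
      pvGoB q t avail need counts =
        ((pvCombA avail need).countP (fun c => pvBumpAll q counts c = t) : Int) := by
  intro need
  induction need with
  | zero =>
    intro avail counts
    simp [pvGoB, pvCombA, pvBumpAll, List.countP_cons]
  | succ k ih =>
    intro avail
    induction avail with
    | nil => intro counts; simp [pvGoB, pvCombA]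
    | cons x xs iha =>
      intro counts
      simp only [pvGoB, pvCombA, List.countP_append, List.countP_map]
      rw [ih xs (pvBump counts q x), iha]
      have : (List.countP ((fun c => decide (pvBumpAll q counts c = t)) ∘ fun c => x :: c)
          (pvCombA xs k)) = List.countP (fun c => decide (pvBumpAll q (pvBump counts q x) c = t))
          (pvCombA xs k) := by
        apply List.countP_congr
        intro c _
        simp [Function.comp, pvBumpAll]
      rw [this]
      push_cast
      ring

-- every combination is a sublist of the source list (hence Nodup on a Nodup source)
theorem pvCombA_sublist : ∀ (k : Nat) (l : List Int), ∀ c ∈ pvCombA l k, c.Sublist l := by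
  intro k
  induction k with
  | zero => intro l c hc; simp [pvCombA] at hc; simp [hc]
  | succ k ih =>
    intro l
    induction l with
    | nil => intro c hc; simp [pvCombA] at hc
    | cons x xs ihl =>
      intro c hc
      simp only [pvCombA, List.mem_append, List.mem_map] at hc
      rcases hc with ⟨d, hd, rfl⟩ | hc
      · exact List.Sublist.cons₂ x (ih xs d hd)
      · exact List.Sublist.cons x (ihl c hc)

-- for a duplicate-free combination, |set(comb) & set(g)| is the membership count
theorem pvInter_len (comb g : List Int) (h : comb.Nodup) :
    PySem.Set.len (PySem.Set.inter (PySem.Set.ofList comb) (PySem.Set.ofList g)) =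
      (comb.countP (fun x => g.contains x) : Int) := by
  rw [PySem.Set.ofList_eq_self_of_nodup comb h]
  simp only [PySem.Set.len, PySem.Set.inter, ← List.countP_eq_length_filter, Int.natCast_inj]
  apply List.countP_congr
  intro x _
  simp [PySem.Set.mem_ofList]

-- the A-side check equals the B-side leaf comparison
theorem pvCheckA_eq (comb : List Int) (h : comb.Nodup) :
    ∀ (q : List (List Int)) (ans : List Int), q.length ≤ ans.length →
      pvCheckA comb q ans =
        decide (q.map (fun g => (comb.countP (fun x => g.contains x) : Int)) = ans.take q.length) := by
  intro q
  induction q with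
  | nil => intro ans _; simp [pvCheckA]
  | cons g gs ih =>
    intro ans hlen
    cases ans with
    | nil => simp at hlen
    | cons a as' =>
      simp only [List.length_cons, Nat.add_le_add_iff_right] at hlen
      simp only [pvCheckA, pvInter_len comb g h, List.map_cons, List.length_cons, List.take_succ_cons]
      rw [ih as' hlen]
      by_cases hm : (comb.countP (fun x => g.contains x) : Int) = a
      · simp [hm]
      · simp [hm]

-- no 5-combination exists from fewer than 5 numbers
theorem pvCombA_eq_nil : ∀ (l : List Int) (k : Nat), l.length < k → pvCombA l k = [] := by
  intro l
  induction l with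
  | nil => intro k h; cases k with | zero => omega | succ k => rfl
  | cons x xs ih =>
    intro k h
    cases k with
    | zero => omega
    | succ m =>
      simp only [List.length_cons] at h
      simp [pvCombA, ih m (by omega), ih (m + 1) (by omega)]

-- the common case: as many answers as queries
theorem solution_eq_of_le (n : Int) (q : List (List Int)) (ans : List Int)
    (hpre : q.length ≤ ans.length) : solution n q ans = solution_alt n q ans := by
  unfold solution
  rw [solution_alt_eq, PySem.List.foldl_if_add_one, pvGoB_eq_countP]
  simp only [zero_add, Int.natCast_inj]
  apply List.countP_congr
  intro c hc
  have hnd : c.Nodup :=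
    (pvCombA_sublist 5 _ c hc).nodup (PySem.List.nodup_pyRange_one 1 (n + 1))
  rw [pvCheckA_eq c hnd q ans hpre, pvBumpAll_replicate]

-- ===== VERDICT (by name: the statement is the Claim_ definition above) =====
theorem solution_spec : Claim_equal_solution := by
  intro n q ans _ hpre
  unfold Spec_solution
  rcases hpre with hle | hn
  · exact solution_eq_of_le n q ans hle
  · have hlen : (PySem.List.pyRange 1 (n + 1) 1).length < 5 := by
      rw [PySem.List.length_pyRange_one]; omega
    have hnil := pvCombA_eq_nil _ 5 hlen
    unfold solution
    rw [solution_alt_eq, hnil, pvGoB_eq_countP, hnil]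
    simp
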